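-- pv_equiv track=rewrite | github.com/Poriteslutea/scheduling_system | test3.py | generate_combinations
-- ===== SOURCE A (Python) =====
-- import itertools
--
-- def is_valid_selection(samples):
--     """Check if the selection meets the condition of differences greater than 2."""
--     return all(abs(a - b) > 2 for a in samples for b in samples if a != b)
--
-- def generate_combinations(set_A, set_B, n_samples, counts):
--     valid_combinations = []
--
--     set_A_list = sorted(set_A)
--     set_B_list = sorted(set_B)
--
--     for count_A, count_B in counts:
--         if count_A + count_B != n_samples:
--             continue
--
--         for a_combination in itertools.combinations(set_A_list, count_A):
--             for b_combination in itertools.combinations(set_B_list, count_B):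
--                 combined_set = list(a_combination) + list(b_combination)
--
--                 if is_valid_selection(combined_set):
--                     valid_combinations.append(combined_set)
--
--     return valid_combinations
-- ===== SOURCE B (Python) =====
-- def generate_combinations(set_A, set_B, n_samples, counts):
--     A = sorted(set_A)
--     B = sorted(set_B)
--     out = []
--
--     def ok(x, chosen):
--         # prune: x must be equal to, or more than 2 apart from, every chosen value
--         return all(x == y or abs(x - y) > 2 for y in chosen)
--
--     def pick_B(rest, need, chosen):
--         if need == 0:
--             out.append(chosen)
--             return
--         if not rest:
--             return
--         y = rest[0]
--         if ok(y, chosen):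
--             pick_B(rest[1:], need - 1, chosen + [y])
--         pick_B(rest[1:], need, chosen)
--
--     def pick_A(rest, ys, need_A, need_B, chosen):
--         if need_A == 0:
--             pick_B(ys, need_B, chosen)
--             return
--         if not rest:
--             return
--         x = rest[0]
--         if ok(x, chosen):
--             pick_A(rest[1:], ys, need_A - 1, need_B, chosen + [x])
--         pick_A(rest[1:], ys, need_A, need_B, chosen)
--
--     for count_A, count_B in counts:
--         if count_A + count_B == n_samples:
--             pick_A(A, B, count_A, count_B, [])
--     return out
-- ===== Notes on version B (the rewrite author's own statement) =====
-- stated objective: alternative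
-- what changed: B replaces A's exhaustive enumeration of all combination pairs followed by a whole-selection validity filter with a recursive backtracking search over the two sorted lists that checks each candidate element against the partial selection and prunes invalid branches early, emitting the same selections in the same order.
import Mathlib
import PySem

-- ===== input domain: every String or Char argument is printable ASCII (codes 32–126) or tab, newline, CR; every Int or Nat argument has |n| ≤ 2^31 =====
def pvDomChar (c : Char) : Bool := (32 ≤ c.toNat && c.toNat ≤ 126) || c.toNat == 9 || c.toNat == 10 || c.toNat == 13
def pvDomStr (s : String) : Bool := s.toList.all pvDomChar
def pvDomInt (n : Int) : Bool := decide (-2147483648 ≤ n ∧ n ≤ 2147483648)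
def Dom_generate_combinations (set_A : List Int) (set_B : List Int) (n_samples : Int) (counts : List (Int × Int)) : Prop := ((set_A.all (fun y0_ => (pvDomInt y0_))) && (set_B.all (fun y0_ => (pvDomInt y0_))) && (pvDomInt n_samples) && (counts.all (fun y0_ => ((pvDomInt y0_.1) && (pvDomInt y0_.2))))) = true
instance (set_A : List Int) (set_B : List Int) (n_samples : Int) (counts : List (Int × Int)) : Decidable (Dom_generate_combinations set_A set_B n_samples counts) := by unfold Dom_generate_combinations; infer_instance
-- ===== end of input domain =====

-- B replaces A's "enumerate every pair of combinations, then filter" with a pruned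
-- backtracking search over the same sorted lists, emitting the same list in the same order.

-- ===== PORT A =====

-- all(abs(a - b) > 2 for a in samples for b in samples if a != b)
def is_valid_selection (samples : List Int) : Bool :=
  samples.all (fun a => samples.all (fun b => a == b || decide (2 < (a - b).natAbs)))

def generate_combinations (set_A : List Int) (set_B : List Int) (n_samples : Int) (counts : List (Int × Int)) : List (List Int) :=
  let set_A_list := PySem.List.sorted set_A (fun x => x) false
  let set_B_list := PySem.List.sorted set_B (fun x => x) false
  counts.foldl (fun valid_combinations p =>
    if p.1 + p.2 ≠ n_samples then valid_combinations
    else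
      -- itertools.combinations; Pre_ guarantees the counts reaching it are nonnegative
      (PySem.List.combinations set_A_list p.1.toNat).foldl (fun acc1 a_combination =>
        (PySem.List.combinations set_B_list p.2.toNat).foldl (fun acc2 b_combination =>
          let combined_set := a_combination ++ b_combination
          if is_valid_selection combined_set then acc2 ++ [combined_set] else acc2) acc1) valid_combinations) []

-- ===== PORT B =====

-- ok(x, chosen): x equal to, or more than 2 apart from, every chosen value
def pvOk (x : Int) (chosen : List Int) : Bool :=
  chosen.all (fun y => x == y || decide (2 < (x - y).natAbs))

def pvPickB : List Int → Int → List Int → List (List Int)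
  | rest, need, chosen =>
    if need = 0 then [chosen]
    else
      match rest with
      | [] => []
      | y :: tail =>
        (if pvOk y chosen then pvPickB tail (need - 1) (chosen ++ [y]) else []) ++
        pvPickB tail need chosen
termination_by rest _ _ => rest.length

def pvPickA : List Int → List Int → Int → Int → List Int → List (List Int)
  | rest, ys, need_A, need_B, chosen =>
    if need_A = 0 then pvPickB ys need_B chosen
    else
      match rest with
      | [] => []
      | x :: tail =>
        (if pvOk x chosen then pvPickA tail ys (need_A - 1) need_B (chosen ++ [x]) else []) ++
        pvPickA tail ys need_A need_B chosen
termination_by rest _ _ _ _ => rest.length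

def generate_combinations_alt (set_A : List Int) (set_B : List Int) (n_samples : Int) (counts : List (Int × Int)) : List (List Int) :=
  let A := PySem.List.sorted set_A (fun x => x) false
  let B := PySem.List.sorted set_B (fun x => x) false
  counts.foldl (fun out p =>
    if p.1 + p.2 = n_samples then out ++ pvPickA A B p.1 p.2 [] else out) []

-- ===== PRECONDITION & SPEC =====
-- Pre_ excludes exactly the inputs on which Python A raises ValueError: a pair in counts whose
-- sum is n_samples with a negative first count, or with a negative second count that is reached
-- because the first count is at most len(set_A).
def Pre_generate_combinations (set_A : List Int) (set_B : List Int) (n_samples : Int) (counts : List (Int × Int)) : Prop :=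
  ∀ p ∈ counts, p.1 + p.2 = n_samples → 0 ≤ p.1 ∧ (p.1 ≤ (set_A.length : Int) → 0 ≤ p.2)
instance (set_A : List Int) (set_B : List Int) (n_samples : Int) (counts : List (Int × Int)) : Decidable (Pre_generate_combinations set_A set_B n_samples counts) := by unfold Pre_generate_combinations; infer_instance

def pvWitness_generate_combinations : List Int × List Int × Int × (List (Int × Int)) :=
  ([1, 5, 9], [2, 20], 2, [(1, 1), (2, 0)])

def Spec_generate_combinations (set_A : List Int) (set_B : List Int) (n_samples : Int) (counts : List (Int × Int)) (out : List (List Int)) : Prop := out = generate_combinations_alt set_A set_B n_samples counts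
instance (set_A : List Int) (set_B : List Int) (n_samples : Int) (counts : List (Int × Int)) (out : List (List Int)) : Decidable (Spec_generate_combinations set_A set_B n_samples counts out) := by unfold Spec_generate_combinations; infer_instance

-- ===== CLAIM (what is proved, stated in full; the proofs are below) =====
def Claim_equal_generate_combinations : Prop := ∀ (set_A : List Int) (set_B : List Int) (n_samples : Int) (counts : List (Int × Int)), Dom_generate_combinations set_A set_B n_samples counts → Pre_generate_combinations set_A set_B n_samples counts → Spec_generate_combinations set_A set_B n_samples counts (generate_combinations set_A set_B n_samples counts)

-- ===== LEMMAS AND PROOFS =====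

-- pvGood chosen l: the incremental validity check B's backtracking performs on the new picks l
def pvGood (chosen : List Int) : List Int → Bool
  | [] => true
  | y :: rest => pvOk y chosen && pvGood (chosen ++ [y]) rest

theorem valid_append_singleton (c : List Int) (y : Int) :
    is_valid_selection (c ++ [y]) = (is_valid_selection c && pvOk y c) := by
  rw [Bool.eq_iff_iff]
  simp only [is_valid_selection, pvOk, List.all_eq_true, List.mem_append,
    List.mem_singleton, Bool.or_eq_true, beq_iff_eq, decide_eq_true_eq, Bool.and_eq_true]
  constructor
  · intro h
    exact ⟨fun a ha b hb => h a (Or.inl ha) b (Or.inl hb), fun b hb => h y (Or.inr rfl) b (Or.inl hb)⟩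
  · rintro ⟨h1, h2⟩ a (ha | rfl) b (hb | rfl)
    · exact h1 a ha b hb
    · rcases h2 a ha with h | h
      · exact Or.inl h.symm
      · exact Or.inr (by omega)
    · exact h2 b hb
    · exact Or.inl rfl

theorem valid_append (l c : List Int) :
    is_valid_selection (c ++ l) = (is_valid_selection c && pvGood c l) := by
  induction l generalizing c with
  | nil => simp [pvGood]
  | cons y rest ih =>
    rw [List.append_cons c y rest, ih, valid_append_singleton]
    simp [pvGood, Bool.and_assoc]

theorem valid_eq_good (l : List Int) : is_valid_selection l = pvGood [] l := by
  have := valid_append l []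
  simpa [is_valid_selection] using this

theorem pickB_spec (ys : List Int) (n : Int) (hn : 0 ≤ n) (chosen : List Int) :
    pvPickB ys n chosen =
      ((PySem.List.combinations ys n.toNat).filter (pvGood chosen)).map (chosen ++ ·) := by
  induction ys generalizing n chosen with
  | nil =>
    rw [pvPickB]
    by_cases h0 : n = 0
    · simp [h0, PySem.List.combinations_zero, pvGood]
    · obtain ⟨k, hk⟩ := Nat.exists_eq_succ_of_ne_zero (n := n.toNat) (by omega)
      simp [h0, hk, PySem.List.combinations_nil_succ]
  | cons y tail ih =>
    rw [pvPickB]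
    by_cases h0 : n = 0
    · simp [h0, PySem.List.combinations_zero, pvGood]
    · have hk : n.toNat = (n - 1).toNat + 1 := by omega
      rw [if_neg h0, hk, PySem.List.combinations_cons_succ, List.filter_append, List.map_append,
        List.filter_map]
      have h1 := ih (n - 1) (by omega) (chosen ++ [y])
      have h2 := ih n hn chosen
      rw [hk] at h2
      simp only [Function.comp_def]
      by_cases hok : pvOk y chosen = true
      · have hf : (fun b => pvGood chosen (y :: b)) = pvGood (chosen ++ [y]) := by
          funext b; simp [pvGood, hok]
        rw [if_pos hok, h1, h2, hf, List.map_map]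
        congr 1
        apply List.map_congr_left
        intro b _
        simp
      · have hf : (fun b => pvGood chosen (y :: b)) = fun _ => false := by
          funext b; simp [pvGood, hok]
        rw [if_neg hok, h2, hf]
        simp

theorem pickA_spec (xs ys : List Int) (nA : Int) (hA : 0 ≤ nA) (nB : Int) (chosen : List Int) :
    pvPickA xs ys nA nB chosen =
      (PySem.List.combinations xs nA.toNat).flatMap
        (fun a => if pvGood chosen a then pvPickB ys nB (chosen ++ a) else []) := by
  induction xs generalizing nA chosen with
  | nil =>
    rw [pvPickA]
    by_cases h0 : nA = 0
    · simp [h0, PySem.List.combinations_zero, pvGood]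
    · obtain ⟨k, hk⟩ := Nat.exists_eq_succ_of_ne_zero (n := nA.toNat) (by omega)
      simp [h0, hk, PySem.List.combinations_nil_succ]
  | cons x tail ih =>
    rw [pvPickA]
    by_cases h0 : nA = 0
    · simp [h0, PySem.List.combinations_zero, pvGood]
    · have hk : nA.toNat = (nA - 1).toNat + 1 := by omega
      rw [if_neg h0, hk, PySem.List.combinations_cons_succ, List.flatMap_append]
      have h1 := ih (nA - 1) (by omega) (chosen ++ [x])
      have h2 := ih nA hA chosen
      rw [hk] at h2
      by_cases hok : pvOk x chosen = true
      · rw [if_pos hok, h1, h2]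
        congr 1
        rw [List.flatMap_map]
        apply List.flatMap_congr
        intro a _
        simp [pvGood, hok]
      · rw [if_neg hok, h2, List.flatMap_map]
        have hz : (fun b => if pvGood chosen (x :: b) = true then pvPickB ys nB (chosen ++ x :: b) else []) =
            fun _ => ([] : List (List Int)) := by
          funext b; simp [pvGood, hok]
        simp only [hz]
        simp

theorem per_pair (sA sB : List Int) (cA cB : Int) (h1 : 0 ≤ cA)
    (h2 : cA ≤ (sA.length : Int) → 0 ≤ cB) (acc : List (List Int)) :
    (PySem.List.combinations sA cA.toNat).foldl (fun acc1 a =>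
        (PySem.List.combinations sB cB.toNat).foldl (fun acc2 b =>
          if is_valid_selection (a ++ b) then acc2 ++ [a ++ b] else acc2) acc1) acc
      = acc ++ pvPickA sA sB cA cB [] := by
  rw [pickA_spec sA sB cA h1 cB []]
  by_cases hB : 0 ≤ cB
  · have hinner : ∀ a ∈ PySem.List.combinations sA cA.toNat, ∀ acc1 : List (List Int),
        (PySem.List.combinations sB cB.toNat).foldl (fun acc2 b =>
          if is_valid_selection (a ++ b) then acc2 ++ [a ++ b] else acc2) acc1
        = acc1 ++ (if pvGood [] a then pvPickB sB cB a else []) := by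
      intro a _ acc1
      rw [PySem.List.foldl_append_if]
      by_cases hg : pvGood [] a = true
      · rw [if_pos hg, pickB_spec sB cB hB a]
        have hfil : List.filter (fun b => is_valid_selection (a ++ b))
              (PySem.List.combinations sB cB.toNat)
            = List.filter (pvGood a) (PySem.List.combinations sB cB.toNat) :=
          List.filter_congr (fun b _ => by
            rw [valid_append b a, valid_eq_good a, hg, Bool.true_and])
        rw [hfil]
      · have hz : (fun b => is_valid_selection (a ++ b)) = fun _ => false := by
          funext b
          rw [valid_append b a, valid_eq_good a]
          simp [hg]
        rw [if_neg hg, hz]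
        simp
    trans ((PySem.List.combinations sA cA.toNat).foldl
        (fun acc1 a => acc1 ++ (if pvGood [] a then pvPickB sB cB a else [])) acc)
    · exact PySem.List.foldl_congr_mem' _ _ _ _ hinner
    · rw [PySem.List.foldl_append_eq_flatMap]
      simp
  · have hlen : (sA.length : Int) < cA := by
      by_contra hcon
      exact hB (h2 (by omega))
    have : PySem.List.combinations sA cA.toNat = [] :=
      PySem.List.combinations_eq_nil_of_length_lt sA (by omega)
    rw [this]
    simp

-- ===== VERDICT (by name: the statement is the Claim_ definition above) =====
theorem generate_combinations_spec : Claim_equal_generate_combinations := by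
  intro set_A set_B n_samples counts _ hpre
  unfold Spec_generate_combinations
  simp only [generate_combinations, generate_combinations_alt]
  refine PySem.List.foldl_congr_mem' _ _ _ _ ?_
  intro p hp acc
  by_cases hsum : p.1 + p.2 = n_samples
  · obtain ⟨hA, hB⟩ := hpre p hp hsum
    rw [if_neg (not_not_intro hsum), if_pos hsum]
    exact per_pair _ _ p.1 p.2 hA
      (by rw [PySem.List.length_sorted]; exact hB) acc
  · rw [if_pos hsum, if_neg hsum]
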